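-- pv_equiv track=rewrite | github.com/ThisIsPatrickM/bareboot-initial-metadata | generate_platform_config.py | get_offset_of
-- ===== SOURCE A (Python) =====
-- def get_offset_of(prop, platform, metadata_sizes: dict, global_metadata_sizes: dict):
--     """Calculates the offset of property, depending on platform and previously
--     calculates metadata sizes"""
--     offset = platform["metadata_label_address"]
--     for key, value in global_metadata_sizes.items():
--         if key == prop:
--             return offset
--         offset += value
--
--     for key, value in metadata_sizes.items():
--         if key == prop:
--             return offset
--         offset += value
--     return 0
-- ===== SOURCE B (Python) =====
-- def get_offset_of(prop, platform, metadata_sizes: dict, global_metadata_sizes: dict):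
--     """Locate prop among the concatenated items, then add the prefix of sizes before it."""
--     items = list(global_metadata_sizes.items()) + list(metadata_sizes.items())
--     keys = [k for k, _ in items]
--     if prop not in keys:
--         return 0
--     i = keys.index(prop)
--     return platform["metadata_label_address"] + sum(v for _, v in items[:i])
-- ===== Notes on version B (the rewrite author's own statement) =====
-- stated objective: alternative
-- what changed: Replaces the two accumulate-and-bail-out loops by concatenating the items, locating prop's first occurrence by index, and summing only the value prefix before it.
import Mathlib
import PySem

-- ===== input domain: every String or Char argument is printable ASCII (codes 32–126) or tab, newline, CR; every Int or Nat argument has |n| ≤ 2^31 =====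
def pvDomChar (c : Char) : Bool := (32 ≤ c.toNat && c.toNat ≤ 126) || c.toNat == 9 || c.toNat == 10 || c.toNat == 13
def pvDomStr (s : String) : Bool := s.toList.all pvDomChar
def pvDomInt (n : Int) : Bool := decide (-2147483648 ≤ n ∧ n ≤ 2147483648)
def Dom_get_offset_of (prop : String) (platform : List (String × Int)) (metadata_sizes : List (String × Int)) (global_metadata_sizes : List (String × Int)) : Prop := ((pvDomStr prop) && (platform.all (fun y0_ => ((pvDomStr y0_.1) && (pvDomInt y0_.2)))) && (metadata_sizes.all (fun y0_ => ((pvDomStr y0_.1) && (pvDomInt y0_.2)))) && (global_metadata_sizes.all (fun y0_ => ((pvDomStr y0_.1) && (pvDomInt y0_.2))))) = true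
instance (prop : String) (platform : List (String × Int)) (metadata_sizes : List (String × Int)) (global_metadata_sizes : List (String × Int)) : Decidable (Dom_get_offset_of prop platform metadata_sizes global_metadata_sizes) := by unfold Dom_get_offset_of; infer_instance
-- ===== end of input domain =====

-- B replaces A's two accumulate-and-bail-out loops by a locate-then-sum-prefix computation
-- over the concatenated items (alternative decomposition; same cost). Return value only.

-- ===== PORT A =====
-- one 'for key, value in d.items(): if key == prop: return offset; offset += value' loop;
-- .inl = early return with the offset reached, .inr = fell through with the accumulated offset
def pvLoopA (prop : String) : List (String × Int) → Int → Sum Int Int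
  | [], offset => .inr offset
  | (k, v) :: rest, offset =>
      if k = prop then .inl offset else pvLoopA prop rest (offset + v)

def get_offset_of (prop : String) (platform : List (String × Int)) (metadata_sizes : List (String × Int)) (global_metadata_sizes : List (String × Int)) : Int :=
  -- platform["metadata_label_address"]: KeyError (missing key) is excluded by Pre_, default irrelevant there
  let offset := (PySem.Dict.ofList platform).getD "metadata_label_address" 0
  match pvLoopA prop (PySem.Dict.ofList global_metadata_sizes).items offset with
  | .inl r => r
  | .inr off1 =>
      match pvLoopA prop (PySem.Dict.ofList metadata_sizes).items off1 with
      | .inl r => r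
      | .inr _ => 0

-- ===== PORT B =====
def get_offset_of_alt (prop : String) (platform : List (String × Int)) (metadata_sizes : List (String × Int)) (global_metadata_sizes : List (String × Int)) : Int :=
  let items := (PySem.Dict.ofList global_metadata_sizes).items ++ (PySem.Dict.ofList metadata_sizes).items
  let keys := items.map Prod.fst
  match PySem.List.index? keys prop with    -- 'prop not in keys' / 'keys.index(prop)' together
  | none => 0
  | some i =>
      (PySem.Dict.ofList platform).getD "metadata_label_address" 0
        + ((items.take i).map Prod.snd).sum   -- items[:i] with i a Nat index = take i

-- ===== PRECONDITION & SPEC =====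
-- Pre_ excludes exactly the inputs where A raises KeyError: platform lacks "metadata_label_address".
def Pre_get_offset_of (prop : String) (platform : List (String × Int)) (metadata_sizes : List (String × Int)) (global_metadata_sizes : List (String × Int)) : Prop :=
  "metadata_label_address" ∈ platform.map Prod.fst
instance (prop : String) (platform : List (String × Int)) (metadata_sizes : List (String × Int)) (global_metadata_sizes : List (String × Int)) : Decidable (Pre_get_offset_of prop platform metadata_sizes global_metadata_sizes) := by unfold Pre_get_offset_of; infer_instance

def pvWitness_get_offset_of : String × (List (String × Int)) × (List (String × Int)) × (List (String × Int)) :=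
  ("b", [("metadata_label_address", 100)], [("b", 4), ("c", 8)], [("a", 2)])

def Spec_get_offset_of (prop : String) (platform : List (String × Int)) (metadata_sizes : List (String × Int)) (global_metadata_sizes : List (String × Int)) (out : Int) : Prop := out = get_offset_of_alt prop platform metadata_sizes global_metadata_sizes
instance (prop : String) (platform : List (String × Int)) (metadata_sizes : List (String × Int)) (global_metadata_sizes : List (String × Int)) (out : Int) : Decidable (Spec_get_offset_of prop platform metadata_sizes global_metadata_sizes out) := by unfold Spec_get_offset_of; infer_instance

-- ===== CLAIM (what is proved, stated in full; the proofs are below) =====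
def Claim_equal_get_offset_of : Prop := ∀ (prop : String) (platform : List (String × Int)) (metadata_sizes : List (String × Int)) (global_metadata_sizes : List (String × Int)), Dom_get_offset_of prop platform metadata_sizes global_metadata_sizes → Pre_get_offset_of prop platform metadata_sizes global_metadata_sizes → Spec_get_offset_of prop platform metadata_sizes global_metadata_sizes (get_offset_of prop platform metadata_sizes global_metadata_sizes)

-- ===== LEMMAS AND PROOFS =====

-- pvLoopA characterised by the first index of prop among the keys
theorem pvLoopA_spec (prop : String) (l : List (String × Int)) (base : Int) :
    pvLoopA prop l base =
      match PySem.List.index? (l.map Prod.fst) prop with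
      | some i => Sum.inl (base + ((l.take i).map Prod.snd).sum)
      | none => Sum.inr (base + (l.map Prod.snd).sum) := by
  induction l generalizing base with
  | nil => simp [pvLoopA, PySem.List.index?]
  | cons p rest ih =>
      obtain ⟨k, v⟩ := p
      by_cases hk : k = prop
      · subst hk
        rw [show (((k, v) :: rest).map Prod.fst) = k :: rest.map Prod.fst from rfl,
            PySem.List.index?_cons_self]
        simp [pvLoopA]
      · rw [show (((k, v) :: rest).map Prod.fst) = k :: rest.map Prod.fst from rfl,
            PySem.List.index?_cons_of_ne _ hk]
        simp only [pvLoopA, if_neg hk, ih]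
        cases h : PySem.List.index? (rest.map Prod.fst) prop with
        | none => simp [List.map_cons, List.sum_cons]; ring
        | some i => simp [List.take_succ_cons, List.map_cons, List.sum_cons]; ring

-- index? over an append when the element is not in the first part
theorem index?_append_of_not_mem {α : Type} [DecidableEq α] (l t : List α) (v : α)
    (h : v ∉ l) : PySem.List.index? (l ++ t) v = (PySem.List.index? t v).map (· + l.length) := by
  induction l with
  | nil => simp [Option.map_id']
  | cons x xs ih =>
      have hx : x ≠ v := fun hxv => h (hxv ▸ List.mem_cons_self)
      rw [List.cons_append, PySem.List.index?_cons_of_ne _ hx,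
          ih (fun hm => h (List.mem_cons_of_mem _ hm))]
      cases PySem.List.index? t v <;> simp <;> omega

-- ===== VERDICT (by name: the statement is the Claim_ definition above) =====
theorem get_offset_of_spec : Claim_equal_get_offset_of := by
  intro prop platform ms gs _hDom _hPre
  unfold Spec_get_offset_of get_offset_of get_offset_of_alt
  set g := (PySem.Dict.ofList gs).items with hg
  set m := (PySem.Dict.ofList ms).items with hm
  set base := (PySem.Dict.ofList platform).getD "metadata_label_address" 0 with hb
  dsimp only
  rw [pvLoopA_spec]
  rw [List.map_append]
  cases hgidx : PySem.List.index? (g.map Prod.fst) prop with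
  | some i =>
      have hmem : prop ∈ g.map Prod.fst := by
        rw [← PySem.List.index?_isSome_iff, hgidx]; rfl
      rw [PySem.List.index?_append_of_mem _ hmem, hgidx]
      have hi : i ≤ g.length := by
        obtain ⟨pre, suf, hsplit, hlen, _⟩ := (PySem.List.index?_eq_some_iff _ _ _).mp hgidx
        have := congrArg List.length hsplit
        simp at this; omega
      simp only [List.take_append_of_le_length (by simpa using hi)]
  | none =>
      have hnm : prop ∉ g.map Prod.fst := (PySem.List.index?_eq_none_iff _ _).mp hgidx
      rw [index?_append_of_not_mem _ _ _ hnm]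
      simp only
      rw [pvLoopA_spec]
      cases hmidx : PySem.List.index? (m.map Prod.fst) prop with
      | none => simp
      | some j =>
          have hjlen : (g.map Prod.fst).length = g.length := by simp
          simp only [Option.map_some]
          have htake : (g ++ m).take (j + (g.map Prod.fst).length) = g ++ m.take j := by
            rw [hjlen, Nat.add_comm, List.take_append,
                List.take_of_length_le (Nat.le_add_right _ _), Nat.add_sub_cancel_left]
          rw [htake]
          simp [List.map_append, List.sum_append]
          ring
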